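-- pv_equiv track=rewrite | github.com/jacken3/PathPlanning | runthis.py | check_cons
-- ===== SOURCE A (Python) =====
-- def check_cons(state_union,state_union_next):
--
--     vertex_collision=[]
--     edge_collision=[]
--     for i in range(len(state_union)):
--         for j in range(i+1,len(state_union)):
--             #边冲突
--             if state_union[i]==state_union_next[j] and state_union[j]==state_union_next[i]:
--                 edge_collision.append((i,j))
--             #顶点冲突
--             if state_union[i]==state_union[j]:
--                 vertex_collision.append((i,j))
--
--     return [vertex_collision,edge_collision]
-- ===== SOURCE B (Python) =====
-- def check_cons(state_union, state_union_next):
--     n = len(state_union)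
--     # index the agents once: by current state, and by (state, next_state) key
--     by_state = {}
--     for k in range(n):
--         by_state.setdefault(state_union[k], []).append(k)
--     by_pair = {}
--     for k in range(n):
--         by_pair.setdefault((state_union[k], state_union_next[k]), []).append(k)
--     vertex_collision = []
--     edge_collision = []
--     for i in range(n):
--         for j in by_state.get(state_union[i], []):
--             if j > i:
--                 vertex_collision.append((i, j))
--         for j in by_pair.get((state_union_next[i], state_union[i]), []):
--             if j > i:
--                 edge_collision.append((i, j))
--     return [vertex_collision, edge_collision]
-- ===== Notes on version B (the rewrite author's own statement) =====
-- stated objective: alternative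
-- what changed: Replaced the all-pairs double loop with two hash indices (agents grouped by current state, and by (state,next_state) key); each agent then pairs only with its own group / the reversed key's group, an output-sensitive traversal instead of scanning every pair.
-- outside the precondition, e.g. on check_cons([5], []): A returns [[], []], B raises IndexError
import Mathlib
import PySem

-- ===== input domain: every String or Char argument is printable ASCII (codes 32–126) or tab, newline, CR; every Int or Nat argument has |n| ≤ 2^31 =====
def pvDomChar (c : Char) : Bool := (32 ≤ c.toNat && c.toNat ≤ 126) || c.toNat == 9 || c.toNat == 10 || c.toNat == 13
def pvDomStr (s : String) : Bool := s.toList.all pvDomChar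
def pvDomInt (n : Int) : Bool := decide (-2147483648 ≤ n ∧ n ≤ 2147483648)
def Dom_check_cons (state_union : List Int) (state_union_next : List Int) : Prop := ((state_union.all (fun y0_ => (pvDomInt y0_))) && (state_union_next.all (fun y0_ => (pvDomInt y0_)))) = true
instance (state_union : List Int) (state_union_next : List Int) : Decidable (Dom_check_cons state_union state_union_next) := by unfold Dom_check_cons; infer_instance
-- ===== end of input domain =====

-- B replaces A's all-pairs double loop by two hash indices (agents grouped by state, and by (state,next)
-- key); each agent then pairs only with its own group — an alternative, output-sensitive traversal.


-- ===== PORT A =====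
-- literal port of A's nested loops; xs[i] is pyGetD (in range under Pre_check_cons)
def check_cons (state_union : List Int) (state_union_next : List Int) : List (List (Int × Int)) :=
  let n : Int := state_union.length
  let res := (PySem.List.pyRange 0 n 1).foldl
    (fun (acc : List (Int × Int) × List (Int × Int)) i =>
      (PySem.List.pyRange (i + 1) n 1).foldl
        (fun acc2 j =>
          let edge := if PySem.List.pyGetD state_union i 0 == PySem.List.pyGetD state_union_next j 0
                        && PySem.List.pyGetD state_union j 0 == PySem.List.pyGetD state_union_next i 0
                      then acc2.2 ++ [(i, j)] else acc2.2
          let vert := if PySem.List.pyGetD state_union i 0 == PySem.List.pyGetD state_union j 0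
                      then acc2.1 ++ [(i, j)] else acc2.1
          (vert, edge)) acc) ([], [])
  [res.1, res.2]

-- ===== PORT B =====
-- B-side helper: one 'setdefault(key, []).append(k)' grouping pass
def pvGroup {κ : Type} [BEq κ] (pairs : List (κ × Int)) : PySem.Dict κ (List Int) :=
  pairs.foldl (fun d p => d.modify p.1 [] (· ++ [p.2])) PySem.Dict.empty

def check_cons_alt (state_union : List Int) (state_union_next : List Int) : List (List (Int × Int)) :=
  let n : Int := state_union.length
  let byState : PySem.Dict Int (List Int) :=
    pvGroup ((PySem.List.pyRange 0 n 1).map (fun k => (PySem.List.pyGetD state_union k 0, k)))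
  let byPair : PySem.Dict (Int × Int) (List Int) :=
    pvGroup ((PySem.List.pyRange 0 n 1).map
      (fun k => ((PySem.List.pyGetD state_union k 0, PySem.List.pyGetD state_union_next k 0), k)))
  let res := (PySem.List.pyRange 0 n 1).foldl
    (fun (acc : List (Int × Int) × List (Int × Int)) i =>
      let vert := (byState.getD (PySem.List.pyGetD state_union i 0) []).foldl
        (fun a j => if i < j then a ++ [(i, j)] else a) acc.1
      let edge := (byPair.getD (PySem.List.pyGetD state_union_next i 0, PySem.List.pyGetD state_union i 0) []).foldl
        (fun a j => if i < j then a ++ [(i, j)] else a) acc.2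
      (vert, edge)) ([], [])
  [res.1, res.2]

-- ===== PRECONDITION & SPEC =====
-- Pre_ requires state_union_next to be at least as long as state_union: on shorter next-lists A raises
-- IndexError as soon as two indices pair up, and returns (trivially [[],[]]) only when state_union has at
-- most one element — where B's indexing pass still raises; those degenerate inputs are excluded.
def Pre_check_cons (state_union : List Int) (state_union_next : List Int) : Prop :=
  state_union.length ≤ state_union_next.length
instance (state_union : List Int) (state_union_next : List Int) : Decidable (Pre_check_cons state_union state_union_next) := by unfold Pre_check_cons; infer_instance
def pvWitness_check_cons : List Int × List Int := ([1, 2, 1, 2], [2, 1, 1, 2])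

def Spec_check_cons (state_union : List Int) (state_union_next : List Int) (out : List (List (Int × Int))) : Prop := out = check_cons_alt state_union state_union_next
instance (state_union : List Int) (state_union_next : List Int) (out : List (List (Int × Int))) : Decidable (Spec_check_cons state_union state_union_next out) := by unfold Spec_check_cons; infer_instance

-- ===== CLAIM (what is proved, stated in full; the proofs are below) =====
def Claim_equal_check_cons : Prop := ∀ (state_union : List Int) (state_union_next : List Int), Dom_check_cons state_union state_union_next → Pre_check_cons state_union state_union_next → Spec_check_cons state_union state_union_next (check_cons state_union state_union_next)

-- ===== LEMMAS AND PROOFS =====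

-- the grouping dict looked up at v is exactly the increasing list of indices whose key equals v
theorem pvGroup_getD {κ : Type} [BEq κ] [LawfulBEq κ] (key : Int → κ) (n : Int) (v : κ) :
    (pvGroup ((PySem.List.pyRange 0 n 1).map (fun k => (key k, k)))).getD v []
      = (PySem.List.pyRange 0 n 1).filter (fun k => key k == v) := by
  unfold pvGroup
  rw [PySem.Dict.getD_foldl_modify_append]
  simp [List.filter_map, Function.comp_def]

-- restricting the whole-range group to indices after i gives A's inner range, filtered
theorem pvTail_filter (n i : Int) (hi : 0 ≤ i) (hin : i < n) (p q : Int → Bool)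
    (hpq : ∀ j, i < j → j < n → p j = q j) :
    ((PySem.List.pyRange 0 n 1).filter p).filter (fun j => decide (i < j))
      = (PySem.List.pyRange (i + 1) n 1).filter q := by
  rw [List.filter_filter, PySem.List.pyRange_one_append 0 (i + 1) n (by omega) (by omega),
      List.filter_append]
  have h1 : (PySem.List.pyRange 0 (i + 1) 1).filter (fun j => decide (i < j) && p j) = [] := by
    apply List.filter_eq_nil_iff.mpr
    intro j hj
    have := (PySem.List.mem_pyRange_one).mp hj
    simp only [Bool.and_eq_true, decide_eq_true_eq, not_and]
    intro _; omega
  rw [h1, List.nil_append]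
  apply List.filter_congr
  intro j hj
  have hjb := (PySem.List.mem_pyRange_one).mp hj
  have : decide (i < j) = true := by simp; omega
  rw [this, Bool.true_and, hpq j (by omega) (by omega)]

-- A's nested loop, as a pair of flatMaps
theorem pvA_shape (n : Int) (cv ce : Int → Int → Bool) :
    (PySem.List.pyRange 0 n 1).foldl
      (fun (acc : List (Int × Int) × List (Int × Int)) i =>
        (PySem.List.pyRange (i + 1) n 1).foldl
          (fun acc2 j =>
            (if cv i j then acc2.1 ++ [(i, j)] else acc2.1,
             if ce i j then acc2.2 ++ [(i, j)] else acc2.2)) acc) ([], [])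
      = ((PySem.List.pyRange 0 n 1).flatMap
           (fun i => ((PySem.List.pyRange (i + 1) n 1).filter (cv i)).map (fun j => (i, j))),
         (PySem.List.pyRange 0 n 1).flatMap
           (fun i => ((PySem.List.pyRange (i + 1) n 1).filter (ce i)).map (fun j => (i, j)))) := by
  rw [PySem.List.foldl_congr_mem
    (g := fun (acc : List (Int × Int) × List (Int × Int)) i =>
      (acc.1 ++ ((PySem.List.pyRange (i + 1) n 1).filter (cv i)).map (fun j => (i, j)),
       acc.2 ++ ((PySem.List.pyRange (i + 1) n 1).filter (ce i)).map (fun j => (i, j))))]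
  · rw [PySem.List.foldl_prod_mk
        (f := fun acc i => acc ++ ((PySem.List.pyRange (i + 1) n 1).filter (cv i)).map (fun j => (i, j)))
        (g := fun acc i => acc ++ ((PySem.List.pyRange (i + 1) n 1).filter (ce i)).map (fun j => (i, j)))]
    rw [PySem.List.foldl_append_eq_flatMap, PySem.List.foldl_append_eq_flatMap]
    simp
  · intro acc i _
    rw [PySem.List.foldl_prod_mk
        (f := fun a j => if cv i j then a ++ [(i, j)] else a)
        (g := fun a j => if ce i j then a ++ [(i, j)] else a)]
    rw [PySem.List.foldl_append_if, PySem.List.foldl_append_if]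

-- B's lookup loop, as a pair of flatMaps
theorem pvB_shape (n : Int) (Lv Le : Int → List Int) :
    (PySem.List.pyRange 0 n 1).foldl
      (fun (acc : List (Int × Int) × List (Int × Int)) i =>
        ((Lv i).foldl (fun a j => if i < j then a ++ [(i, j)] else a) acc.1,
         (Le i).foldl (fun a j => if i < j then a ++ [(i, j)] else a) acc.2)) ([], [])
      = ((PySem.List.pyRange 0 n 1).flatMap
           (fun i => ((Lv i).filter (fun j => decide (i < j))).map (fun j => (i, j))),
         (PySem.List.pyRange 0 n 1).flatMap
           (fun i => ((Le i).filter (fun j => decide (i < j))).map (fun j => (i, j)))) := by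
  rw [PySem.List.foldl_congr_mem
    (g := fun (acc : List (Int × Int) × List (Int × Int)) i =>
      (acc.1 ++ ((Lv i).filter (fun j => decide (i < j))).map (fun j => (i, j)),
       acc.2 ++ ((Le i).filter (fun j => decide (i < j))).map (fun j => (i, j))))]
  · rw [PySem.List.foldl_prod_mk
        (f := fun acc i => acc ++ ((Lv i).filter (fun j => decide (i < j))).map (fun j => (i, j)))
        (g := fun acc i => acc ++ ((Le i).filter (fun j => decide (i < j))).map (fun j => (i, j)))]
    rw [PySem.List.foldl_append_eq_flatMap, PySem.List.foldl_append_eq_flatMap]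
    simp
  · intro acc i _
    rw [PySem.List.foldl_append_ite (p := fun j => i < j) (f := fun j => (i, j)),
        PySem.List.foldl_append_ite (p := fun j => i < j) (f := fun j => (i, j))]

-- ===== VERDICT (by name: the statement is the Claim_ definition above) =====
theorem check_cons_spec : Claim_equal_check_cons := by
  intro su sn _ _
  unfold Spec_check_cons check_cons check_cons_alt
  dsimp only
  rw [pvA_shape, pvB_shape]
  have hv : ∀ i ∈ PySem.List.pyRange 0 (su.length : Int) 1,
      (((pvGroup ((PySem.List.pyRange 0 (su.length : Int) 1).map
          (fun k => (PySem.List.pyGetD su k 0, k)))).getD (PySem.List.pyGetD su i 0) []).filter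
        (fun j => decide (i < j))).map (fun j => (i, j))
      = ((PySem.List.pyRange (i + 1) (su.length : Int) 1).filter
          (fun j => PySem.List.pyGetD su i 0 == PySem.List.pyGetD su j 0)).map (fun j => (i, j)) := by
    intro i hi
    have hib := (PySem.List.mem_pyRange_one).mp hi
    rw [pvGroup_getD (key := fun k => PySem.List.pyGetD su k 0),
        pvTail_filter _ i hib.1 hib.2 _ _ (fun j _ _ => Bool.beq_comm)]
  have he : ∀ i ∈ PySem.List.pyRange 0 (su.length : Int) 1,
      (((pvGroup ((PySem.List.pyRange 0 (su.length : Int) 1).map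
          (fun k => ((PySem.List.pyGetD su k 0, PySem.List.pyGetD sn k 0), k)))).getD
          (PySem.List.pyGetD sn i 0, PySem.List.pyGetD su i 0) []).filter
        (fun j => decide (i < j))).map (fun j => (i, j))
      = ((PySem.List.pyRange (i + 1) (su.length : Int) 1).filter
          (fun j => PySem.List.pyGetD su i 0 == PySem.List.pyGetD sn j 0
                 && PySem.List.pyGetD su j 0 == PySem.List.pyGetD sn i 0)).map (fun j => (i, j)) := by
    intro i hi
    have hib := (PySem.List.mem_pyRange_one).mp hi
    rw [pvGroup_getD (key := fun k => (PySem.List.pyGetD su k 0, PySem.List.pyGetD sn k 0)),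
        pvTail_filter _ i hib.1 hib.2 _ _ ?_]
    intro j _ _
    show (PySem.List.pyGetD su j 0 == PySem.List.pyGetD sn i 0
          && PySem.List.pyGetD sn j 0 == PySem.List.pyGetD su i 0) = _
    rw [Bool.beq_comm (a := PySem.List.pyGetD sn j 0), Bool.and_comm]
  rw [List.flatMap_congr hv, List.flatMap_congr he]
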